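-- pv_equiv track=rewrite | github.com/khushi2704rj-sephora/GameForge | backend/app/simulations/pirate_division.py | _backward_induction
-- ===== SOURCE A (Python) =====
-- def _backward_induction(n: int, treasure: int) -> list[int]:
--     """Compute SPNE via backward induction."""
--     if n == 1:
--         return [treasure]
--     if n == 2:
--         return [treasure, 0]
--     # For n pirates, proposer buys every other pirate starting from the end
--     division = [0] * n
--     votes_needed = n // 2  # excluding self, need this many
--     bought = 0
--     for i in range(n - 1, 0, -2):
--         if bought < votes_needed:
--             division[i] = 1
--             bought += 1
--     division[0] = treasure - sum(division)
--     return division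
-- ===== SOURCE B (Python) =====
-- def _backward_induction(n: int, treasure: int) -> list[int]:
--     """Compute SPNE via backward induction (closed form per index)."""
--     if n == 2:
--         return [treasure, 0]
--     # proposer keeps treasure - n//2; pirate i>0 gets 1 exactly when n-i is odd
--     return [treasure - n // 2 if i == 0 else (n - i) % 2 for i in range(n)]
-- ===== Notes on version B (the rewrite author's own statement) =====
-- stated objective: simpler
-- what changed: Replaces the stride loop with a running vote counter plus a final sum() by a closed-form per-index formula: entry 0 is treasure - n//2 and entry i>0 is (n-i) % 2; only the n==2 base case remains special.
import Mathlib
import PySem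

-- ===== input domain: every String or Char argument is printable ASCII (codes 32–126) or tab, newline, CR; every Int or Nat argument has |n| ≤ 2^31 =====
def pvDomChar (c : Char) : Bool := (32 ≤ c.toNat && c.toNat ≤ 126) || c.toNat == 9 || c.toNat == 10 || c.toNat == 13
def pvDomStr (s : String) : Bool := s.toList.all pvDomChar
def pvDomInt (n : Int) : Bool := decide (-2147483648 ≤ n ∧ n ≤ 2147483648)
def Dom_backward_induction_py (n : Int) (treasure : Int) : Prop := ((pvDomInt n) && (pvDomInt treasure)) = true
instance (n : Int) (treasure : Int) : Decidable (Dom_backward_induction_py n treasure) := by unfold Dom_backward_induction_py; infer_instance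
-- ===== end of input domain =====

-- B replaces A's stride loop (running vote counter + final sum()) by a closed-form per-index
-- formula — entry 0 is treasure - n//2, entry i>0 is (n-i) % 2 — for simplicity, same cost.

-- ===== PORT A =====
def backward_induction_py (n : Int) (treasure : Int) : List Int :=
  if n == 1 then [treasure]
  else if n == 2 then [treasure, 0]
  else
    -- division = [0] * n   ([0]*n is [] for n ≤ 0, as Int.toNat clamps)
    let division : List Int := List.replicate n.toNat 0
    let votes_needed : Int := PySem.Int.floordiv n 2
    -- for i in range(n - 1, 0, -2): if bought < votes_needed: division[i] = 1; bought += 1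
    -- (every i produced by this range satisfies 1 ≤ i < n, so division[i] = 1 is List.set)
    let st := (PySem.List.pyRange (n - 1) 0 (-2)).foldl
      (fun (st : List Int × Int) i =>
        if st.2 < votes_needed then (st.1.set i.toNat 1, st.2 + 1) else st)
      (division, 0)
    -- division[0] = treasure - sum(division)
    st.1.set 0 (treasure - st.1.sum)

-- ===== PORT B =====
def backward_induction_py_alt (n : Int) (treasure : Int) : List Int :=
  if n == 2 then [treasure, 0]
  else (PySem.List.pyRange 0 n 1).map
    (fun i => if i == 0 then treasure - PySem.Int.floordiv n 2 else PySem.Int.mod (n - i) 2)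

-- ===== PRECONDITION & SPEC =====
-- Pre_ excludes n ≤ 0, where Python A raises IndexError (division[0] on the empty list).
def Pre_backward_induction_py (n : Int) (treasure : Int) : Prop := 1 ≤ n
instance (n : Int) (treasure : Int) : Decidable (Pre_backward_induction_py n treasure) := by unfold Pre_backward_induction_py; infer_instance
def pvWitness_backward_induction_py : Int × Int := (5, 100)

def Spec_backward_induction_py (n : Int) (treasure : Int) (out : List Int) : Prop := out = backward_induction_py_alt n treasure
instance (n : Int) (treasure : Int) (out : List Int) : Decidable (Spec_backward_induction_py n treasure out) := by unfold Spec_backward_induction_py; infer_instance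

-- ===== CLAIM (what is proved, stated in full; the proofs are below) =====
def Claim_equal_backward_induction_py : Prop := ∀ (n : Int) (treasure : Int), Dom_backward_induction_py n treasure → Pre_backward_induction_py n treasure → Spec_backward_induction_py n treasure (backward_induction_py n treasure)

-- ===== LEMMAS AND PROOFS =====

-- the value A's loop has written at index i after the first j iterations (m = n, list length)
def markFun (m j i : Nat) : Int := if (m - 1 - i) % 2 = 0 ∧ m - 1 - i < 2 * j then 1 else 0

-- A's counter never reaches votes_needed, so the guarded fold is a plain fold of sets
theorem drop_counter (v : Int) (ks : List Int) : ∀ (xs : List Int) (b : Int),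
    b + ks.length ≤ v →
    ks.foldl (fun (st : List Int × Int) i =>
        if st.2 < v then (st.1.set i.toNat 1, st.2 + 1) else st) (xs, b)
      = (ks.foldl (fun l i => l.set i.toNat 1) xs, b + ks.length) := by
  induction ks with
  | nil => intro xs b h; simp
  | cons k ks ih =>
    intro xs b h
    simp only [List.length_cons] at h
    have hb : b < v := by push_cast at h ⊢; omega
    simp only [List.foldl_cons, if_pos hb]
    rw [ih (xs.set k.toNat 1) (b + 1) (by push_cast at h ⊢; omega)]
    exact congrArg (Prod.mk _) (by simp only [List.length_cons]; push_cast; ring)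

-- one more loop iteration sets position m-1-2*j
theorem mark_step (m j : Nat) (hj : j + 1 ≤ m / 2) :
    (List.range m).map (markFun m (j + 1))
      = ((List.range m).map (markFun m j)).set (m - 1 - 2 * j) 1 := by
  apply List.ext_getElem (by simp)
  intro i h1 h2
  simp only [List.getElem_set, List.getElem_map, List.getElem_range, markFun]
  simp only [List.length_map, List.length_range] at h1
  split_ifs <;> omega

theorem mark_invariant (m : Nat) : ∀ j, j ≤ m / 2 →
    ((List.range j).map (fun (k : Nat) => ((m : Int) - 1) + (-2) * (k : Int))).foldl
        (fun (l : List Int) i => l.set i.toNat 1) (List.replicate m 0)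
      = (List.range m).map (markFun m j) := by
  intro j
  induction j with
  | zero =>
    intro _
    apply List.ext_getElem (by simp)
    intro i h1 h2
    simp only [List.range_zero, List.map_nil, List.foldl_nil, List.getElem_replicate,
      List.getElem_map, List.getElem_range, markFun]
    rw [if_neg (by omega)]
  | succ j ih =>
    intro hj
    rw [List.range_succ, List.map_append, List.foldl_append, ih (by omega),
      List.map_singleton, List.foldl_cons, List.foldl_nil, mark_step m j hj]
    congr 1
    omega

theorem sum_set_eq (a : Int) (l : List Int) : ∀ (p : Nat) (hp : p < l.length),
    (l.set p a).sum = l.sum + a - l[p] := by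
  induction l with
  | nil => intro p h; simp at h
  | cons x xs ih =>
    intro p h
    cases p with
    | zero => simp [List.set]; ring
    | succ p =>
      simp only [List.set, List.sum_cons, List.getElem_cons_succ]
      rw [ih p (by simpa using h)]
      ring

theorem mark_sum (m : Nat) : ∀ j, j ≤ m / 2 →
    ((List.range m).map (markFun m j)).sum = (j : Int) := by
  intro j
  induction j with
  | zero =>
    intro _
    apply List.sum_eq_zero
    intro x hx
    simp only [List.mem_map, List.mem_range, markFun] at hx
    obtain ⟨i, _, hi⟩ := hx
    rw [if_neg (by omega)] at hi
    omega
  | succ j ih =>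
    intro hj
    rw [mark_step m j hj,
      sum_set_eq 1 _ (m - 1 - 2 * j) (by simp; omega),
      ih (by omega)]
    have : ((List.range m).map (markFun m j))[m - 1 - 2 * j]'(by simp; omega) = 0 := by
      simp only [List.getElem_map, List.getElem_range, markFun]
      rw [if_neg (by omega)]
    rw [this]
    push_cast; ring

-- ===== VERDICT (by name: the statement is the Claim_ definition above) =====
theorem backward_induction_py_spec : Claim_equal_backward_induction_py := by
  intro n t _ hpre
  unfold Spec_backward_induction_py backward_induction_py backward_induction_py_alt
  unfold Pre_backward_induction_py at hpre
  by_cases h1 : n = 1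
  · subst h1
    norm_num [PySem.List.pyRange, (by decide : PySem.Int.floordiv 1 2 = 0)]
  by_cases h2 : n = 2
  · subst h2
    norm_num [PySem.List.pyRange, (by decide : PySem.Int.floordiv 2 2 = 1)]
  -- n >= 3; write n as a natural number m
  have hn3 : 3 ≤ n := by omega
  obtain ⟨m, rfl⟩ : ∃ m : Nat, n = (m : Int) := ⟨n.toNat, (Int.toNat_of_nonneg (by omega)).symm⟩
  have hm : 3 ≤ m := by exact_mod_cast hn3
  rw [if_neg (by simpa using h1), if_neg (by simpa using h2), if_neg (by simpa using h2)]
  have hrange : PySem.List.pyRange ((m : Int) - 1) 0 (-2)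
      = (List.range (m / 2)).map (fun (k : Nat) => ((m : Int) - 1) + (-2) * (k : Int)) := by
    simp only [PySem.List.pyRange]
    rw [if_neg (by norm_num), if_neg (by norm_num), if_pos (by omega)]
    congr 2
    norm_num
    omega
  have hfd : PySem.Int.floordiv (m : Int) 2 = ((m / 2 : Nat) : Int) := by
    exact_mod_cast PySem.Int.floordiv_natCast m 2
  have hlen : ((PySem.List.pyRange ((m : Int) - 1) 0 (-2)).length : Int) = ((m / 2 : Nat) : Int) := by
    rw [hrange]; simp
  have hdc := drop_counter ((m / 2 : Nat) : Int) (PySem.List.pyRange ((m : Int) - 1) 0 (-2))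
    (List.replicate (Int.toNat (m : Int)) 0) 0 (by rw [hlen]; omega)
  have hplain : (PySem.List.pyRange ((m : Int) - 1) 0 (-2)).foldl
      (fun (l : List Int) i => l.set i.toNat 1) (List.replicate (Int.toNat (m : Int)) 0)
      = (List.range m).map (markFun m (m / 2)) := by
    rw [hrange, Int.toNat_natCast]
    exact mark_invariant m (m / 2) le_rfl
  simp only [hfd, hdc, hplain, mark_sum m (m / 2) le_rfl]
  rw [PySem.List.pyRange_one]
  simp only [sub_zero, Int.toNat_natCast, List.map_map]
  apply List.ext_getElem (by simp)
  intro i h1 h2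
  simp only [List.length_map, List.length_range] at h2
  simp only [List.getElem_set, List.getElem_map, List.getElem_range, Function.comp]
  by_cases hi : i = 0
  · subst hi
    norm_num
  · rw [if_neg (by omega), if_neg (by simp [hi]),
      PySem.Int.mod_eq_emod_of_pos (by norm_num)]
    simp only [markFun]
    split_ifs <;> omega
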